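-- pv_equiv track=rewrite | github.com/Randy-sin/dsespeakingweb | scripts/collect_missing.py | generate_full_sequence
-- ===== SOURCE A (Python) =====
-- import math
--
-- def generate_full_sequence(num_images):
--     num_groups = math.ceil(num_images / 3)
--     seq = []
--     for g in range(1, num_groups + 1):
--         for s in range(1, 4):
--             seq.append(f"{g}.{s}")
--             if len(seq) == num_images:
--                 return seq
--     return seq
-- ===== SOURCE B (Python) =====
-- def generate_full_sequence(num_images):
--     return [f"{i // 3 + 1}.{i % 3 + 1}" for i in range(num_images)]
-- ===== Notes on version B (the rewrite author's own statement) =====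
-- stated objective: simpler
-- what changed: B computes each label directly from the zero-based output index in one flat comprehension (i//3+1, i%3+1), replacing A's nested group/sub loops with their early-return length guard.
import Mathlib
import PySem

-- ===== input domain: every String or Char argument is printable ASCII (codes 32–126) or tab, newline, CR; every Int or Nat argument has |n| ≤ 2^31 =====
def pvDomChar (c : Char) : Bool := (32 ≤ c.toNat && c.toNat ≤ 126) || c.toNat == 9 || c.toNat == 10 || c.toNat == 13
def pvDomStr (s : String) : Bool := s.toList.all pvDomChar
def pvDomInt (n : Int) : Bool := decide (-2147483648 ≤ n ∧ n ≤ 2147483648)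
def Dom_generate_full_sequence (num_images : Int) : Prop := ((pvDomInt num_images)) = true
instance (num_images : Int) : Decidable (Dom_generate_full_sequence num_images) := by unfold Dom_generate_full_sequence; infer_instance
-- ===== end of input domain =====

-- B replaces A's nested group/sub loops (with early-return length guard) by one flat
-- pass computing each label from its zero-based index: simpler decomposition, same O(n) cost.


-- ===== PORT A =====
-- f"{g}.{s}"
def pvLblA (g s : Int) : String := PySem.Int.toStr g ++ "." ++ PySem.Int.toStr s

-- inner 'for s in range(1, 4)' loop with its early return ('.inl seq' = returned seq)
def pvInnerA (n g : Int) : List Int → List String → (List String) ⊕ (List String)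
  | [], seq => .inr seq
  | s :: rest, seq =>
    let seq' := seq ++ [pvLblA g s]
    if (seq'.length : Int) = n then .inl seq' else pvInnerA n g rest seq'

-- outer 'for g in range(1, num_groups + 1)' loop
def pvOuterA (n : Int) : List Int → List String → List String
  | [], seq => seq
  | g :: rest, seq =>
    match pvInnerA n g (PySem.List.pyRange 1 4 1) seq with
    | .inl done => done
    | .inr seq' => pvOuterA n rest seq'

def generate_full_sequence (num_images : Int) : List String :=
  -- math.ceil(num_images / 3) = -((-num_images) // 3); exact for every |num_images| ≤ 2^31
  let num_groups : Int := -(PySem.Int.floordiv (-num_images) 3)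
  pvOuterA num_images (PySem.List.pyRange 1 (num_groups + 1) 1) []

-- ===== PORT B =====
def generate_full_sequence_alt (num_images : Int) : List String :=
  (PySem.List.pyRange 0 num_images 1).map
    (fun i => PySem.Int.toStr (PySem.Int.floordiv i 3 + 1) ++ "." ++
              PySem.Int.toStr (PySem.Int.mod i 3 + 1))

-- ===== PRECONDITION & SPEC =====
def Spec_generate_full_sequence (num_images : Int) (out : List String) : Prop := out = generate_full_sequence_alt num_images
instance (num_images : Int) (out : List String) : Decidable (Spec_generate_full_sequence num_images out) := by unfold Spec_generate_full_sequence; infer_instance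

-- ===== CLAIM (what is proved, stated in full; the proofs are below) =====
def Claim_equal_generate_full_sequence : Prop := ∀ (num_images : Int), Dom_generate_full_sequence num_images → Spec_generate_full_sequence num_images (generate_full_sequence num_images)

-- ===== LEMMAS AND PROOFS =====
-- B's per-index label, phrased on a Nat index
def pvLblN (i : Nat) : String :=
  PySem.Int.toStr ((i / 3 : Nat) + 1 : Int) ++ "." ++ PySem.Int.toStr ((i % 3 : Nat) + 1 : Int)

theorem pvRange14 : PySem.List.pyRange 1 4 1 = [1, 2, 3] := by decide

theorem pvRange'_cons3 (a m : Nat) :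
    List.range' a (m + 3) = a :: (a + 1) :: (a + 2) :: List.range' (a + 3) m := by
  rw [Nat.add_comm m 3]
  simp [List.range'_succ, Nat.add_comm, Nat.add_left_comm]

theorem pvLblN_3j_0 (j : Nat) : pvLblN (3 * j) = pvLblA ((j : Int) + 1) 1 := by
  unfold pvLblN pvLblA
  have h1 : (3 * j) / 3 = j := by omega
  have h2 : (3 * j) % 3 = 0 := by omega
  rw [h1, h2]; norm_num

theorem pvLblN_3j_1 (j : Nat) : pvLblN (3 * j + 1) = pvLblA ((j : Int) + 1) 2 := by
  unfold pvLblN pvLblA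
  have h1 : (3 * j + 1) / 3 = j := by omega
  have h2 : (3 * j + 1) % 3 = 1 := by omega
  rw [h1, h2]; norm_num

theorem pvLblN_3j_2 (j : Nat) : pvLblN (3 * j + 2) = pvLblA ((j : Int) + 1) 3 := by
  unfold pvLblN pvLblA
  have h1 : (3 * j + 2) / 3 = j := by omega
  have h2 : (3 * j + 2) % 3 = 2 := by omega
  rw [h1, h2]; norm_num

-- main loop invariant: with seq holding the first 3*j labels and k groups left,
-- the outer loop appends exactly the labels for indices 3*j .. n-1
theorem pvOuterA_run (k : Nat) : ∀ (j : Nat) (n : Int) (seq : List String),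
    seq.length = 3 * j → (3 * j : Int) < n → n ≤ 3 * ((j : Int) + k) →
    pvOuterA n (PySem.List.pyRange ((j : Int) + 1) ((j : Int) + 1 + k) 1) seq
      = seq ++ (List.range' (3 * j) (n.toNat - 3 * j)).map pvLblN := by
  induction k with
  | zero => intro j n seq hlen hlt hle; omega
  | succ k ih =>
    intro j n seq hlen hlt hle
    have hcons : PySem.List.pyRange ((j : Int) + 1) ((j : Int) + 1 + (k + 1 : Nat)) 1
        = ((j : Int) + 1) :: PySem.List.pyRange ((j : Int) + 1 + 1) ((j : Int) + 1 + (k + 1 : Nat)) 1 :=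
      PySem.List.pyRange_one_cons (by push_cast; omega)
    rw [hcons]
    simp only [pvOuterA, pvRange14, pvInnerA, List.length_append, List.length_singleton, hlen]
    by_cases h1 : ((3 * j + 1 : Nat) : Int) = n
    · simp only [if_pos h1]
      have hn : n.toNat - 3 * j = 1 := by omega
      rw [hn]
      simp [List.range', pvLblN_3j_0]
    · simp only [if_neg h1]
      by_cases h2 : ((3 * j + 1 + 1 : Nat) : Int) = n
      · simp only [if_pos h2]
        have hn : n.toNat - 3 * j = 2 := by omega
        rw [hn]
        simp [List.range', pvLblN_3j_0, pvLblN_3j_1]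
      · simp only [if_neg h2]
        by_cases h3 : ((3 * j + 1 + 1 + 1 : Nat) : Int) = n
        · simp only [if_pos h3]
          have hn : n.toNat - 3 * j = 3 := by omega
          rw [hn]
          simp [List.range', pvLblN_3j_0, pvLblN_3j_1, pvLblN_3j_2]
        · simp only [if_neg h3]
          have hrec := ih (j + 1) n (seq ++ [pvLblA ((j : Int) + 1) 1] ++ [pvLblA ((j : Int) + 1) 2] ++ [pvLblA ((j : Int) + 1) 3])
            (by simp [hlen]; omega) (by push_cast; push_cast at hlt h1 h2 h3; omega)
            (by push_cast; push_cast at hle; omega)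
          have harg : PySem.List.pyRange ((j : Int) + 1 + 1) ((j : Int) + 1 + (k + 1 : Nat)) 1
              = PySem.List.pyRange (((j + 1 : Nat) : Int) + 1) (((j + 1 : Nat) : Int) + 1 + k) 1 := by
            congr 1 <;> (push_cast; omega)
          rw [harg, hrec]
          have hsplit : n.toNat - 3 * j = (n.toNat - 3 * (j + 1)) + 3 := by
            push_cast at hlt h1 h2 h3; omega
          rw [hsplit, pvRange'_cons3]
          have h3j : 3 * j + 3 = 3 * (j + 1) := by omega
          rw [h3j]
          simp [pvLblN_3j_0, pvLblN_3j_1, pvLblN_3j_2]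

-- B equals the same canonical map over indices
theorem pvAlt_eq (n : Int) (hn : 0 < n) :
    generate_full_sequence_alt n = (List.range' 0 n.toNat).map pvLblN := by
  unfold generate_full_sequence_alt
  rw [PySem.List.pyRange_one, ← List.range_eq_range']
  have h0 : (n - 0).toNat = n.toNat := by omega
  rw [h0, List.map_map]
  apply List.map_congr_left
  intro k _
  simp only [Function.comp_apply, zero_add]
  unfold pvLblN
  rw [PySem.Int.floordiv_eq_ediv_of_pos (by norm_num), PySem.Int.mod_eq_emod_of_pos (by norm_num)]
  have hd : (↑k : Int) / 3 = ↑(k / 3) := by omega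
  have hm : (↑k : Int) % 3 = ↑(k % 3) := by omega
  rw [hd, hm]

-- ===== VERDICT (by name: the statement is the Claim_ definition above) =====
theorem generate_full_sequence_spec : Claim_equal_generate_full_sequence := by
  intro n _
  unfold Spec_generate_full_sequence generate_full_sequence
  simp only []
  by_cases hn : n ≤ 0
  · have hG : -(PySem.Int.floordiv (-n) 3) ≤ 0 := by
      rw [PySem.Int.floordiv_eq_ediv_of_pos (by omega)]; omega
    rw [PySem.List.pyRange_one_eq_nil (by omega)]
    unfold pvOuterA generate_full_sequence_alt
    rw [PySem.List.pyRange_one_eq_nil (by omega)]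
    simp
  · replace hn : 0 < n := by omega
    set G : Int := -(PySem.Int.floordiv (-n) 3) with hGdef
    have hGe : G = -((-n) / 3) := by rw [hGdef, PySem.Int.floordiv_eq_ediv_of_pos (by omega)]
    have hGpos : 0 < G := by omega
    have hub : n ≤ 3 * G := by omega
    have hrange : PySem.List.pyRange 1 (G + 1) 1
        = PySem.List.pyRange (((0 : Nat) : Int) + 1) (((0 : Nat) : Int) + 1 + G.toNat) 1 := by
      congr 1 <;> omega
    rw [hrange, pvOuterA_run G.toNat 0 n [] (by simp) (by omega) (by push_cast; omega)]
    rw [pvAlt_eq n hn]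
    simp
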